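-- pv_equiv track=rewrite | github.com/lukevladthagi/Projeto-Pronto | controle_agenda/views.py | consolidar_por_prestador
-- ===== SOURCE A (Python) =====
-- def consolidar_por_prestador(agendamentos):
--     consolidado_por_prestador = {}
--
--     for agendamento in agendamentos:
--         prestador = agendamento["nm_prestador"]
--
--         if prestador in consolidado_por_prestador:
--             consolidado_por_prestador[prestador].append(agendamento)
--         else:
--             consolidado_por_prestador[prestador] = [agendamento]
--
--     # Organiza o dicionário por ordem alfabética das chaves (nomes dos prestadores)
--     consolidado_por_prestador_ordenado = dict(sorted(consolidado_por_prestador.items()))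
--
--     return consolidado_por_prestador_ordenado
-- ===== SOURCE B (Python) =====
-- def consolidar_por_prestador(agendamentos):
--     # Distinct provider names, sorted; then one filter per name.
--     # Filtering preserves the original order of each provider's appointments.
--     nomes = sorted({a["nm_prestador"] for a in agendamentos})
--     return {n: [a for a in agendamentos if a["nm_prestador"] == n] for n in nomes}
-- ===== Notes on version B (the rewrite author's own statement) =====
-- stated objective: alternative
-- what changed: B replaces A's dict-grouping fold plus final sort of grouped items by a set of the distinct provider names, sorted, followed by one list-filter per name; no incremental grouping dict is built at all.
import Mathlib
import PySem

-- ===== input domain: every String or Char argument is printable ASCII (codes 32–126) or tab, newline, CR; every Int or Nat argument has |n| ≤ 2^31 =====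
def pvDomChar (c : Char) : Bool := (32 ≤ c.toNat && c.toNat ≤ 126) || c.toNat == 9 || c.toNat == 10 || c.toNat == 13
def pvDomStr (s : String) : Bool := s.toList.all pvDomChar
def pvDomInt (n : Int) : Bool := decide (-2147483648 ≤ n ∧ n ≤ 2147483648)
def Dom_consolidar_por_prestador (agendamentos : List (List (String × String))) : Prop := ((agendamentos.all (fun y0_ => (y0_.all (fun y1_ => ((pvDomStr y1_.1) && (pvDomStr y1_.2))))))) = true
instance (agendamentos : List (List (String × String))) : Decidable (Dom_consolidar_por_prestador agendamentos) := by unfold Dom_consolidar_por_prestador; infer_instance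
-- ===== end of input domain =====

-- B builds no grouping dict at all: it sorts the SET of distinct provider names and emits one
-- filtered sublist of the input per name; objective: alternative decomposition, same return value.

-- ===== PORT A =====
-- agendamento["nm_prestador"]: Python raises KeyError when the key is absent; Pre_ excludes
-- those inputs, so the '.getD ""' default never fires on admitted inputs.
def pvPrestador (a : List (String × String)) : String :=
  ((PySem.Dict.mk a).get? "nm_prestador").getD ""

def consolidar_por_prestador (agendamentos : List (List (String × String))) :
    List (String × List (List (String × String))) :=
  let consolidado := agendamentos.foldl
    (fun d ag =>
      let p := pvPrestador ag
      if d.contains p then d.modify p [] (fun l => l ++ [ag])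
      else d.insert p [ag])
    PySem.Dict.empty
  -- sorted(consolidado.items()): the dict's keys are distinct, so Python's tuple comparison
  -- only ever reads the first components; key = fst is exact here.
  PySem.List.sorted consolidado.items (fun kv => kv.1) false

-- ===== PORT B =====
def consolidar_por_prestador_alt (agendamentos : List (List (String × String))) :
    List (String × List (List (String × String))) :=
  let nomes := PySem.List.sorted
    (PySem.Set.ofList (agendamentos.map pvPrestador)) (fun n => n) false
  nomes.map (fun n => (n, agendamentos.filter (fun a => pvPrestador a == n)))

-- ===== PRECONDITION & SPEC =====
-- Pre_ excludes exactly the inputs where Python A raises KeyError: an agendamento without the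
-- "nm_prestador" key.
def Pre_consolidar_por_prestador (agendamentos : List (List (String × String))) : Prop :=
  ∀ ag ∈ agendamentos, (PySem.Dict.mk ag).contains "nm_prestador" = true
instance (agendamentos : List (List (String × String))) : Decidable (Pre_consolidar_por_prestador agendamentos) := by unfold Pre_consolidar_por_prestador; infer_instance

def pvWitness_consolidar_por_prestador : (List (List (String × String))) :=
  [[("nm_prestador", "bruna"), ("hora", "10")],
   [("nm_prestador", "ana"), ("hora", "9")],
   [("nm_prestador", "bruna"), ("hora", "8")]]

def Spec_consolidar_por_prestador (agendamentos : List (List (String × String))) (out : List (String × List (List (String × String)))) : Prop := out = consolidar_por_prestador_alt agendamentos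
instance (agendamentos : List (List (String × String))) (out : List (String × List (List (String × String)))) : Decidable (Spec_consolidar_por_prestador agendamentos out) := by unfold Spec_consolidar_por_prestador; infer_instance

-- ===== CLAIM =====
def Claim_equal_consolidar_por_prestador : Prop := ∀ (agendamentos : List (List (String × String))), Dom_consolidar_por_prestador agendamentos → Pre_consolidar_por_prestador agendamentos → Spec_consolidar_por_prestador agendamentos (consolidar_por_prestador agendamentos)

-- ===== LEMMAS AND PROOFS =====

-- The grouping step of A, abbreviated for the proofs.
def pvGroup (l : List (List (String × String))) :
    PySem.Dict String (List (List (String × String))) :=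
  l.foldl (fun d ag => d.modify (pvPrestador ag) [] (fun l => l ++ [ag])) PySem.Dict.empty

-- A's if/else body is exactly the modify step (on a missing key, modify appends at the end,
-- which is what A's insert branch does).
lemma foldA_eq_pvGroup (l : List (List (String × String))) :
    ∀ d : PySem.Dict String (List (List (String × String))), (l.foldl
      (fun d ag =>
        let p := pvPrestador ag
        if d.contains p then d.modify p [] (fun l => l ++ [ag])
        else d.insert p [ag]) d)
      = l.foldl (fun d ag => d.modify (pvPrestador ag) [] (fun l => l ++ [ag])) d := by
  induction l with
  | nil => intro d; rfl
  | cons a t ih =>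
    intro d
    simp only [List.foldl_cons]
    rw [← ih]
    congr 1
    by_cases h : d.contains (pvPrestador a) = true
    · simp [h]
    · simp only [h]
      rw [PySem.Dict.modify, PySem.Dict.getD_of_not_contains _ _ (by simpa using h)]
      simp

-- Characterisation of A's grouped items: distinct keys in first-appearance order,
-- each paired with the sublist of its appointments in input order.
lemma items_pvGroup (l : List (List (String × String))) :
    (pvGroup l).items
      = (PySem.Set.ofList (l.map pvPrestador)).map
          (fun k => (k, l.filter (fun ag => pvPrestador ag == k))) := by
  unfold pvGroup
  have hnd : (l.foldl (fun d ag => d.modify (pvPrestador ag) [] (fun l => l ++ [ag]))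
      PySem.Dict.empty).keys.Nodup :=
    PySem.Dict.nodup_keys_foldl_modify_key l pvPrestador [] (fun _ ag => fun s => s ++ [ag])
      PySem.Dict.empty PySem.Dict.nodup_keys_empty
  rw [PySem.Dict.items_eq_map_keys _ hnd []]
  rw [PySem.Dict.keys_foldl_modify_key l pvPrestador [] (fun _ ag => fun s => s ++ [ag])]
  have hupd : PySem.Set.update
        (PySem.Dict.empty : PySem.Dict String (List (List (String × String)))).keys
        (l.map pvPrestador)
      = PySem.Set.ofList (l.map pvPrestador) := by
    rw [PySem.Set.ofList_eq_foldl, PySem.Dict.keys_empty]; rfl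
  rw [hupd]
  apply List.map_congr_left
  intro k hk
  have hfold : l.foldl (fun d ag => d.modify (pvPrestador ag) [] (fun s => s ++ [ag]))
      PySem.Dict.empty
      = (l.map (fun ag => (pvPrestador ag, ag))).foldl
          (fun d p => d.modify p.1 [] (fun s => s ++ [p.2])) PySem.Dict.empty := by
    rw [List.foldl_map]
  rw [hfold, PySem.Dict.getD_foldl_modify_append]
  simp [List.filter_map, List.map_map, Function.comp_def]

-- Sorting the grouped items by key is the same as mapping the group constructor over the
-- sorted key set (keys are distinct, so the sorted order is strictly increasing and unique).
lemma sorted_items_eq (l : List (List (String × String))) :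
    PySem.List.sorted
        ((PySem.Set.ofList (l.map pvPrestador)).map
          (fun k => (k, l.filter (fun ag => pvPrestador ag == k))))
        (fun kv => kv.1) false
      = (PySem.List.sorted (PySem.Set.ofList (l.map pvPrestador)) (fun n => n) false).map
          (fun k => (k, l.filter (fun ag => pvPrestador ag == k))) := by
  apply PySem.List.sorted_eq_of_perm_of_pairwise_lt
  · exact (PySem.List.sorted_perm _ _ _).map _
  · rw [List.pairwise_map]
    exact PySem.List.sorted_ofList_pairwise_lt _

-- ===== VERDICT =====
theorem consolidar_por_prestador_spec : Claim_equal_consolidar_por_prestador := by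
  intro l _ _
  unfold Spec_consolidar_por_prestador consolidar_por_prestador consolidar_por_prestador_alt
  rw [foldA_eq_pvGroup l PySem.Dict.empty]
  show PySem.List.sorted (pvGroup l).items (fun kv => kv.1) false = _
  rw [items_pvGroup, sorted_items_eq]
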